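-- pv_equiv track=rewrite | github.com/thehalleyyoung/deppy | deppy/lean/body_translation.py | _is_dict_like
-- ===== SOURCE A (Python) =====
-- def _is_dict_like(t: str) -> bool:
--     if not t:
--         return False
--     for prefix in ("dict", "Dict", "Mapping", "MutableMapping",
--                    "OrderedDict", "defaultdict", "Counter"):
--         if t == prefix or t.startswith(prefix + "["):
--             return True
--     return False
-- ===== SOURCE B (Python) =====
-- _DICT_BASES = {"dict", "Dict", "Mapping", "MutableMapping",
--                "OrderedDict", "defaultdict", "Counter"}
--
-- def _is_dict_like(t: str) -> bool:
--     return t.split("[", 1)[0] in _DICT_BASES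
-- ===== Notes on version B (the rewrite author's own statement) =====
-- stated objective: simpler
-- what changed: Replaces the loop that tests each of seven prefixes with equality-or-startswith by a single split on the first '[' followed by one set-membership test of the base name.
import Mathlib
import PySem

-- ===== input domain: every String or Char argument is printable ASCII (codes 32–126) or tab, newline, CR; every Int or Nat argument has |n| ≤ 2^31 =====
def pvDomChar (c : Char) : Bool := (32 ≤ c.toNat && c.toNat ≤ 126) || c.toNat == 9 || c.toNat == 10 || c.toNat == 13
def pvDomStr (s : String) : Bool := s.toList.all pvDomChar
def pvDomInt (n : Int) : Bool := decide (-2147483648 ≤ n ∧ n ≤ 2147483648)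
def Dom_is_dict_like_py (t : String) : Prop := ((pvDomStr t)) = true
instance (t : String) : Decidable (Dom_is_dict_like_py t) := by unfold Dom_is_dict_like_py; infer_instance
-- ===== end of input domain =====

-- B replaces A's seven-way equality-or-startswith prefix loop by one split at the first '['
-- followed by a single set-membership test of the base name (objective: simpler).

-- ===== PORT A =====
-- the tuple of prefixes A loops over
def pvPrefixes : List String :=
  ["dict", "Dict", "Mapping", "MutableMapping", "OrderedDict", "defaultdict", "Counter"]

def is_dict_like_py (t : String) : Bool :=
  -- `if not t: return False`
  if t = "" then false
  else
    -- the for-loop with early `return True`: any prefix with `t == prefix or t.startswith(prefix + "[")`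
    pvPrefixes.any (fun p => t == p || PySem.Str.startswith t (p ++ "["))

-- ===== PORT B =====
-- the set literal _DICT_BASES
def pvDictBases : PySem.Set String :=
  PySem.Set.ofList ["dict", "Dict", "Mapping", "MutableMapping", "OrderedDict", "defaultdict", "Counter"]

def is_dict_like_py_alt (t : String) : Bool :=
  -- t.split("[", 1): sep "[" is nonempty so splitMax? is always `some`;
  -- [0]: Python's split always returns at least one piece, so headD's default is never used
  let parts : List String := (PySem.Str.splitMax? t "[" 1).getD []
  let base : String := parts.headD ""
  decide (base ∈ pvDictBases)

-- ===== PRECONDITION & SPEC =====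
def Spec_is_dict_like_py (t : String) (out : Bool) : Prop := out = is_dict_like_py_alt t
instance (t : String) (out : Bool) : Decidable (Spec_is_dict_like_py t out) := by unfold Spec_is_dict_like_py; infer_instance

-- ===== CLAIM (what is proved, stated in full; the proofs are below) =====
def Claim_equal_is_dict_like_py : Prop := ∀ (t : String), Dom_is_dict_like_py t → Spec_is_dict_like_py t (is_dict_like_py t)

-- ===== LEMMAS AND PROOFS =====

-- the first element of splitOnMax.go is the last accumulated piece once acc is nonempty
theorem pv_go_head_acc (sep : List Char) (fuel : Nat) :
    ∀ (m : Nat) (t cur : List Char) (a : List Char) (as : List (List Char)),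
    (PySem.Chars.splitOnMax.go sep fuel m t cur (a :: as)).head? = (a :: as).getLast? := by
  induction fuel with
  | zero =>
    intro m t cur a as
    simp [PySem.Chars.splitOnMax.go, List.getLast?_cons]
  | succ f ih =>
    intro m t cur a as
    cases t with
    | nil => simp [PySem.Chars.splitOnMax.go, List.getLast?_cons]
    | cons c rest =>
      simp only [PySem.Chars.splitOnMax.go]
      split_ifs with hm hp
      · simp [List.head?_reverse, List.getLast?_cons]
      · rw [ih]; simp [List.getLast?_cons]
      · rw [ih]

-- the first piece of s.split("[", 1) is everything before the first '['
theorem pv_go_head_one (t : List Char) :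
    ∀ (fuel : Nat) (cur : List Char), t.length ≤ fuel →
    (PySem.Chars.splitOnMax.go ['['] fuel 1 t cur []).head? =
      some (cur.reverse ++ t.takeWhile (fun c => c != '[')) := by
  induction t with
  | nil =>
    intro fuel cur _
    cases fuel <;> simp [PySem.Chars.splitOnMax.go]
  | cons c rest ih =>
    intro fuel cur hf
    cases fuel with
    | zero => simp at hf
    | succ f =>
      by_cases hc : c = '['
      · subst hc
        rw [show PySem.Chars.splitOnMax.go ['['] (f+1) 1 ('['::rest) cur [] =
              PySem.Chars.splitOnMax.go ['['] f 0 rest [] [cur.reverse] from by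
            simp [PySem.Chars.splitOnMax.go, List.isPrefixOf]]
        rw [pv_go_head_acc]
        simp
      · rw [show PySem.Chars.splitOnMax.go ['['] (f+1) 1 (c::rest) cur [] =
              PySem.Chars.splitOnMax.go ['['] f 1 rest (c::cur) [] from by
            simp [PySem.Chars.splitOnMax.go, List.isPrefixOf, Ne.symm hc]]
        rw [ih f (c :: cur) (by simpa using hf)]
        simp [hc]

theorem pv_base_eq (t : String) :
    ((PySem.Str.splitMax? t "[" 1).getD []).headD "" =
      String.ofList (t.toList.takeWhile (fun c => c != '[')) := by
  have h1 : PySem.Chars.splitMax? t.toList ['['] 1 =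
      some (PySem.Chars.splitOnMax.go ['['] (t.toList.length + 1) 1 t.toList [] []) := by
    simp [PySem.Chars.splitMax?, PySem.Chars.splitOnMax]
  have h2 := pv_go_head_one t.toList (t.toList.length + 1) [] (by omega)
  simp only [PySem.Str.splitMax?]
  rw [show ("[" : String).toList = ['['] from rfl, h1]
  simp only [Option.map_some, Option.getD_some, List.headD_eq_head?_getD, List.head?_map, h2]
  simp

-- the chars before the first '[' equal p iff the string is p or starts with p ++ "["
theorem pv_takeWhile_eq_iff (s p : List Char) (hp : '[' ∉ p) :
    s.takeWhile (fun c => c != '[') = p ↔ (s = p ∨ p ++ ['['] <+: s) := by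
  induction s generalizing p with
  | nil =>
    cases p <;> simp
  | cons c s' ih =>
    cases p with
    | nil =>
      by_cases hc : c = '['
      · simp [hc, List.cons_prefix_cons]
      · simp [hc, List.cons_prefix_cons]
        exact fun h => hc h.symm
    | cons q p' =>
      have hq : q ≠ '[' := fun h => hp (by simp [h])
      have hp' : '[' ∉ p' := fun h => hp (by simp [h])
      by_cases hc : c = '['
      · subst hc
        simp [List.cons_prefix_cons, eq_comm]
        exact ⟨fun h => absurd h hq, fun h => absurd h hq⟩
      · rw [List.takeWhile_cons_of_pos (by simp [hc])]
        simp only [List.cons.injEq, ih p' hp', List.cons_append, List.cons_prefix_cons]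
        constructor
        · rintro ⟨h1, h2 | h2⟩
          · exact Or.inl ⟨h1, h2⟩
          · exact Or.inr ⟨h1.symm, h2⟩
        · rintro (⟨h1, h2⟩ | ⟨h1, h2⟩)
          · exact ⟨h1, Or.inl h2⟩
          · exact ⟨h1.symm, Or.inr h2⟩

theorem pv_ofList_eq_iff (l : List Char) (s : String) : String.ofList l = s ↔ l = s.toList := by
  constructor
  · intro h; rw [← h]; simp
  · intro h; rw [h]; simp

-- A's per-prefix test, expressed through the base segment
theorem pv_prefix_test (t p : String) (hp : '[' ∉ p.toList) :
    (t = p ∨ PySem.Str.startswith t (p ++ "[") = true) ↔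
      t.toList.takeWhile (fun c => c != '[') = p.toList := by
  rw [pv_takeWhile_eq_iff _ _ hp]
  rw [show PySem.Str.startswith t (p ++ "[") = PySem.Chars.startswith t.toList (p ++ "[").toList from by simp]
  rw [PySem.Chars.startswith_iff]
  rw [← String.toList_inj]
  simp

-- ===== VERDICT (by name: the statement is the Claim_ definition above) =====
theorem is_dict_like_py_spec : Claim_equal_is_dict_like_py := by
  intro t _
  unfold Spec_is_dict_like_py is_dict_like_py is_dict_like_py_alt
  show _ = decide ((((PySem.Str.splitMax? t "[" 1).getD []).headD "") ∈ pvDictBases)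
  rw [pv_base_eq]
  by_cases ht : t = ""
  · subst ht; decide
  · rw [if_neg ht]
    apply Bool.eq_iff_iff.mpr
    simp only [pvPrefixes, pvDictBases, List.any_cons, List.any_nil, Bool.or_eq_true,
      Bool.or_false, beq_iff_eq, decide_eq_true_eq, PySem.Set.mem_ofList,
      List.mem_cons, List.not_mem_nil, or_false, pv_ofList_eq_iff]
    rw [← pv_prefix_test t "dict" (by decide), ← pv_prefix_test t "Dict" (by decide),
        ← pv_prefix_test t "Mapping" (by decide), ← pv_prefix_test t "MutableMapping" (by decide),
        ← pv_prefix_test t "OrderedDict" (by decide), ← pv_prefix_test t "defaultdict" (by decide),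
        ← pv_prefix_test t "Counter" (by decide)]
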